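-- pv_equiv track=rewrite | github.com/hystax/optscale | bumiworker/bumiworker/modules/recommendations/obsolete_snapshot_chains.py | _group_by_chains
-- ===== SOURCE A (Python) =====
-- def _group_by_chains(snapshots_to_chains, resource_map):
--     grouped_by_chains = {}
--     for resource_id, last_used in resource_map.items():
--         chain_id = snapshots_to_chains.get(resource_id)
--         if chain_id is not None:
--             current_last_used = grouped_by_chains.get(chain_id)
--             if current_last_used is None or current_last_used < last_used:
--                 grouped_by_chains[chain_id] = last_used
--     return grouped_by_chains
-- ===== SOURCE B (Python) =====
-- def _group_by_chains(snapshots_to_chains, resource_map):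
--     # two-phase: first group all last_used values per chain, then reduce with max
--     groups = {}
--     for resource_id, last_used in resource_map.items():
--         chain_id = snapshots_to_chains.get(resource_id)
--         if chain_id is not None:
--             groups.setdefault(chain_id, []).append(last_used)
--     return {chain_id: max(values) for chain_id, values in groups.items()}
-- ===== Notes on version B (the rewrite author's own statement) =====
-- stated objective: alternative
-- what changed: B replaces A's single-pass running-max dict with a two-phase build-index-then-reduce structure: it first groups every last_used into a dict of lists keyed by chain_id, then builds the result as a comprehension taking max of each group.
import Mathlib
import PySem

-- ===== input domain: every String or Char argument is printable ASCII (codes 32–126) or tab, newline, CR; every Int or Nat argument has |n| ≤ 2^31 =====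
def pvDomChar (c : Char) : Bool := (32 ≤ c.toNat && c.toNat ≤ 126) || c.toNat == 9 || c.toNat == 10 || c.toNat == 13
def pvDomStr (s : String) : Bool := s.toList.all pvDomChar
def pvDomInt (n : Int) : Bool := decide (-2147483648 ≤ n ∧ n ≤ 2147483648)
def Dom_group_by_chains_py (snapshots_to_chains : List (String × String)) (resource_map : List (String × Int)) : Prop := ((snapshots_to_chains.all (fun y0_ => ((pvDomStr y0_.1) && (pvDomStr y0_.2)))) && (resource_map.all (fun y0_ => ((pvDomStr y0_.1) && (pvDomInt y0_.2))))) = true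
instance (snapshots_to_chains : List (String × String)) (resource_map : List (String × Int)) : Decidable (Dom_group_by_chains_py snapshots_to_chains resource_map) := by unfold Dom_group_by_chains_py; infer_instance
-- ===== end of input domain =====

-- B replaces A's single-pass running-max dict with a build-index-then-reduce two-phase
-- structure (group last_used values per chain, then take max of each group); alternative
-- decomposition, same asymptotic cost.

-- ===== PORT A =====
-- single pass keeping a running maximum per chain
def group_by_chains_py (snapshots_to_chains : List (String × String)) (resource_map : List (String × Int)) : List (String × Int) :=
  (resource_map.foldl (fun grouped p =>
      match (PySem.Dict.mk snapshots_to_chains).get? p.1 with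
      | none => grouped
      | some chain_id =>
        match grouped.get? chain_id with
        | none => grouped.insert chain_id p.2
        | some current => if current < p.2 then grouped.insert chain_id p.2 else grouped)
    (PySem.Dict.empty : PySem.Dict String Int)).items

-- ===== PORT B =====
-- phase 1: dict of lists per chain (setdefault(...).append(v) = modify with default [] appending);
-- phase 2: comprehension taking max of each group (Python max = PySem.List.max? with identity key)
def group_by_chains_py_alt (snapshots_to_chains : List (String × String)) (resource_map : List (String × Int)) : List (String × Int) :=
  ((resource_map.foldl (fun groups p =>
      match (PySem.Dict.mk snapshots_to_chains).get? p.1 with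
      | none => groups
      | some chain_id => groups.modify chain_id [] (· ++ [p.2]))
    (PySem.Dict.empty : PySem.Dict String (List Int))).items).map
    (fun q => (q.1, (PySem.List.max? q.2 (fun x => x)).getD 0))

-- ===== PRECONDITION & SPEC =====
def Spec_group_by_chains_py (snapshots_to_chains : List (String × String)) (resource_map : List (String × Int)) (out : List (String × Int)) : Prop := out = group_by_chains_py_alt snapshots_to_chains resource_map
instance (snapshots_to_chains : List (String × String)) (resource_map : List (String × Int)) (out : List (String × Int)) : Decidable (Spec_group_by_chains_py snapshots_to_chains resource_map out) := by unfold Spec_group_by_chains_py; infer_instance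

-- ===== CLAIM (what is proved, stated in full; the proofs are below) =====
def Claim_equal_group_by_chains_py : Prop := ∀ (snapshots_to_chains : List (String × String)) (resource_map : List (String × Int)), Dom_group_by_chains_py snapshots_to_chains resource_map → Spec_group_by_chains_py snapshots_to_chains resource_map (group_by_chains_py snapshots_to_chains resource_map)

-- ===== LEMMAS AND PROOFS =====

-- max of a list of ints, Python style (0 default is never reached: groups are nonempty)
def pvMx (vs : List Int) : Option Int := PySem.List.max? vs (fun x => x)

def pvMxStep (acc : Option Int) (x : Int) : Option Int :=
  match acc with
  | none => some x
  | some m => if m < x then some x else some m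

-- the value-wise "take the max" image of the grouping dict
def pvMapD (d : PySem.Dict String (List Int)) : PySem.Dict String Int :=
  PySem.Dict.mk (d.items.map (fun q => (q.1, (pvMx q.2).getD 0)))

def pvStepA (d : PySem.Dict String Int) (q : String × Int) : PySem.Dict String Int :=
  match d.get? q.1 with
  | none => d.insert q.1 q.2
  | some current => if current < q.2 then d.insert q.1 q.2 else d

def pvStepB (d : PySem.Dict String (List Int)) (q : String × Int) : PySem.Dict String (List Int) :=
  d.insert q.1 (d.getD q.1 [] ++ [q.2])

def pvKey (stc : List (String × String)) (p : String × Int) : Option (String × Int) :=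
  ((PySem.Dict.mk stc).get? p.1).map (fun c => (c, p.2))

lemma pvMapD_get? (d : PySem.Dict String (List Int)) (c : String) :
    (pvMapD d).get? c = (d.get? c).map (fun vs => (pvMx vs).getD 0) := by
  simp [pvMapD, PySem.Dict.get?, List.find?_map, Function.comp_def, Option.map_map]

lemma pvMapD_contains (d : PySem.Dict String (List Int)) (c : String) :
    (pvMapD d).contains c = d.contains c := by
  simp [pvMapD, PySem.Dict.contains, List.any_map, Function.comp_def]

lemma pvMapD_insert (d : PySem.Dict String (List Int)) (c : String) (w : List Int) :
    pvMapD (d.insert c w) = (pvMapD d).insert c ((pvMx w).getD 0) := by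
  have hc : (PySem.Dict.mk (d.items.map (fun q => (q.1, (pvMx q.2).getD 0)))).contains c
      = d.contains c := pvMapD_contains d c
  apply PySem.Dict.ext
  by_cases h : d.contains c = true
  · simp only [pvMapD, PySem.Dict.insert, hc, h, if_true, List.map_map]
    apply List.map_congr_left
    intro q _
    by_cases hq : q.1 = c <;> simp [hq]
  · simp only [pvMapD, PySem.Dict.insert, hc, h]
    simp [List.map_append]

lemma pvMx_eq (vs : List Int) : pvMx vs = vs.foldl pvMxStep none := by
  unfold pvMx PySem.List.max?
  apply List.foldl_ext
  intro acc x _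
  cases acc <;> rfl

lemma pvMx_append (vs : List Int) (v : Int) : pvMx (vs ++ [v]) = pvMxStep (pvMx vs) v := by
  rw [pvMx_eq, pvMx_eq, List.foldl_append]
  rfl

lemma pvMx_some_of_ne_nil (vs : List Int) (h : vs ≠ []) : ∃ m, pvMx vs = some m := by
  induction vs using List.reverseRecOn with
  | nil => exact absurd rfl h
  | append_singleton xs x ih =>
    rcases eq_or_ne xs [] with hxs | hxs
    · subst hxs; exact ⟨x, rfl⟩
    · obtain ⟨m, hm⟩ := ih hxs
      rw [pvMx_append, hm]
      by_cases hlt : m < x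
      · exact ⟨x, by simp [pvMxStep, hlt]⟩
      · exact ⟨m, by simp [pvMxStep, hlt]⟩

-- inserting a key's own current value changes nothing
lemma pvInsert_self_value (d : PySem.Dict String Int) (c : String) (v : Int)
    (hnd : d.keys.Nodup) (h : d.get? c = some v) : d.insert c v = d := by
  have hc : d.contains c = true := by
    rw [PySem.Dict.contains_eq_isSome_get?, h]; rfl
  apply PySem.Dict.ext
  simp only [PySem.Dict.insert, hc, if_true]
  conv_rhs => rw [← List.map_id d.items]
  apply List.map_congr_left
  intro q hq
  by_cases hqc : (q.1 == c) = true
  · obtain ⟨qk, qv⟩ := q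
    have hq1 : qk = c := beq_iff_eq.mp hqc
    subst hq1
    have hv : qv = v := by
      have := PySem.Dict.get?_of_mem_items d hq hnd
      rw [h] at this
      exact (Option.some_injective _ this.symm)
    simp [hv]
  · simp [hqc]

lemma pvStep_rel (gB : PySem.Dict String (List Int)) (q : String × Int)
    (hnd : gB.keys.Nodup) (hne : ∀ p ∈ gB.items, p.2 ≠ []) :
    pvStepA (pvMapD gB) q = pvMapD (pvStepB gB q) := by
  unfold pvStepA pvStepB
  rw [pvMapD_get?, pvMapD_insert]
  cases hg : gB.get? q.1 with
  | none =>
    have hd : gB.getD q.1 [] = [] := by simp [PySem.Dict.getD, hg]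
    simp [hd, pvMx, PySem.List.max?]
  | some vs =>
    have hd : gB.getD q.1 [] = vs := by simp [PySem.Dict.getD, hg]
    have hvs : vs ≠ [] := hne _ (PySem.Dict.mem_items_of_get?_eq_some gB hg)
    obtain ⟨m, hm⟩ := pvMx_some_of_ne_nil vs hvs
    rw [hd, pvMx_append, hm]
    simp only [Option.map_some, hm, Option.getD_some, pvMxStep]
    by_cases hlt : m < q.2
    · simp [hlt]
    · simp only [hlt, if_false]
      rw [pvInsert_self_value]
      · simpa [pvMapD] using hnd
      · rw [pvMapD_get?, hg]; simp [hm]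

lemma pvStepB_nodup (gB : PySem.Dict String (List Int)) (q : String × Int)
    (hnd : gB.keys.Nodup) : (pvStepB gB q).keys.Nodup :=
  PySem.Dict.nodup_keys_insert _ _ _ hnd

lemma pvStepB_ne_nil (gB : PySem.Dict String (List Int)) (q : String × Int)
    (hne : ∀ p ∈ gB.items, p.2 ≠ []) : ∀ p ∈ (pvStepB gB q).items, p.2 ≠ [] := by
  intro p hp
  rcases (PySem.Dict.mem_items_insert _ _ _ _).mp hp with h | ⟨h, _⟩
  · subst h; simp
  · exact hne _ h

lemma pvFold_rel (l : List (String × Int)) (gB : PySem.Dict String (List Int))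
    (hnd : gB.keys.Nodup) (hne : ∀ p ∈ gB.items, p.2 ≠ []) :
    l.foldl pvStepA (pvMapD gB) = pvMapD (l.foldl pvStepB gB) := by
  induction l generalizing gB with
  | nil => rfl
  | cons q l ih =>
    simp only [List.foldl_cons]
    rw [pvStep_rel gB q hnd hne]
    exact ih _ (pvStepB_nodup gB q hnd) (pvStepB_ne_nil gB q hne)

-- A's guarded loop is the plain pvStepA fold over the resolved (chain_id, last_used) pairs
lemma pvFoldA (stc : List (String × String)) (l : List (String × Int)) (init : PySem.Dict String Int) :
    l.foldl (fun grouped p =>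
        match (PySem.Dict.mk stc).get? p.1 with
        | none => grouped
        | some chain_id =>
          match grouped.get? chain_id with
          | none => grouped.insert chain_id p.2
          | some current => if current < p.2 then grouped.insert chain_id p.2 else grouped) init
      = (l.filterMap (pvKey stc)).foldl pvStepA init := by
  induction l generalizing init with
  | nil => rfl
  | cons p l ih =>
    simp only [List.foldl_cons, List.filterMap_cons, pvKey]
    cases (PySem.Dict.mk stc).get? p.1 with
    | none => exact ih init
    | some c => exact ih _

-- B's guarded loop is the plain pvStepB fold over the same resolved pairs
lemma pvFoldB (stc : List (String × String)) (l : List (String × Int))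
    (init : PySem.Dict String (List Int)) :
    l.foldl (fun groups p =>
        match (PySem.Dict.mk stc).get? p.1 with
        | none => groups
        | some chain_id => groups.modify chain_id [] (· ++ [p.2])) init
      = (l.filterMap (pvKey stc)).foldl pvStepB init := by
  induction l generalizing init with
  | nil => rfl
  | cons p l ih =>
    simp only [List.foldl_cons, List.filterMap_cons, pvKey]
    cases (PySem.Dict.mk stc).get? p.1 with
    | none => exact ih init
    | some c => exact ih _

-- ===== VERDICT (by name: the statement is the Claim_ definition above) =====
theorem group_by_chains_py_spec : Claim_equal_group_by_chains_py := by
  intro stc rm _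
  unfold Spec_group_by_chains_py group_by_chains_py group_by_chains_py_alt
  rw [pvFoldA stc rm, pvFoldB stc rm]
  have h := pvFold_rel (rm.filterMap (pvKey stc)) PySem.Dict.empty
      (by simp [PySem.Dict.empty, PySem.Dict.keys])
      (by intro p hp; simp [PySem.Dict.empty] at hp)
  have hempty : pvMapD PySem.Dict.empty = PySem.Dict.empty := rfl
  rw [hempty] at h
  rw [h]
  rfl
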